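-- pv_equiv track=rewrite | github.com/rucjrliu/QSPN_code | qspn/Structure/mqspnJoinReader.py | workload_join_pattern_tables
-- ===== SOURCE A (Python) =====
-- def workload_join_pattern_tables(workload):
--     join_pattern = {}
--     for i in workload:
--         for j in i[0]:
--             for k in i[0]:
--                 if j != k:
--                     lt = min(j, k)
--                     rt = max(j, k)
--                     if (lt, rt) not in join_pattern:
--                         join_pattern[(lt, rt)] = 1
--                     else:
--                         join_pattern[(lt, rt)] += 1
--     return join_pattern
-- ===== SOURCE B (Python) =====
-- def workload_join_pattern_tables(workload):
--     join_pattern = {}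
--     for entry in workload:
--         cnt = {}
--         for t in entry[0]:
--             cnt[t] = cnt.get(t, 0) + 1
--         queue = list(cnt)
--         while queue:
--             a = queue.pop(0)
--             ca = cnt[a]
--             for b in queue:
--                 lt, rt = (a, b) if a < b else (b, a)
--                 join_pattern[(lt, rt)] = join_pattern.get((lt, rt), 0) + 2 * ca * cnt[b]
--     return join_pattern
-- ===== Notes on version B (the rewrite author's own statement) =====
-- stated objective: alternative
-- what changed: Instead of enumerating all ordered position pairs of each entry (O(m^2) per entry), B builds a frequency map of the entry's table ids once and then walks the unordered pairs of DISTINCT ids, adding 2*cnt[a]*cnt[b] to the global counter in one step per value pair (O(d^2) over distinct ids, d <= m).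
import Mathlib
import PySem

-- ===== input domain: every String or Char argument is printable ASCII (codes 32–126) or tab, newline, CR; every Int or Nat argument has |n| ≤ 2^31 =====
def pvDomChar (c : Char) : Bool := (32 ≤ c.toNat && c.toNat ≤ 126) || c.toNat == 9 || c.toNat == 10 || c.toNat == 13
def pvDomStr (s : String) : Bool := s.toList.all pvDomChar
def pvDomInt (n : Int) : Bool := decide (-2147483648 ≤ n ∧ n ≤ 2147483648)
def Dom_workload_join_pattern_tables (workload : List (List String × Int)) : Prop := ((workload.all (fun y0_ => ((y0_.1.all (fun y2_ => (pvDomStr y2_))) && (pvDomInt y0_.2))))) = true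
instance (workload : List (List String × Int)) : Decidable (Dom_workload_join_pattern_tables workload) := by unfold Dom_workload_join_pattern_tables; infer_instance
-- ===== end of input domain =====

-- B replaces A's per-entry double loop over positions by a frequency map over the entry's
-- ids followed by one update of 2*cnt[a]*cnt[b] per unordered pair of distinct ids (objective: alternative).

-- ===== PORT A =====
def workload_join_pattern_tables (workload : List (List String × Int)) : List (String × String × Int) :=
  let jp : PySem.Dict (String × String) Int :=
    workload.foldl (fun jp i =>
      i.1.foldl (fun jp j =>
        i.1.foldl (fun jp k =>
          if j ≠ k then
            let lt := min j k
            let rt := max j k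
            if jp.contains (lt, rt) = false then jp.insert (lt, rt) 1
            else jp.insert (lt, rt) (jp.getD (lt, rt) 0 + 1)
          else jp) jp) jp) PySem.Dict.empty
  jp.items.map (fun p => (p.1.1, p.1.2, p.2))

-- ===== PORT B =====
-- while queue: a = queue.pop(0); for b in queue: bump (sorted pair) by 2*cnt[a]*cnt[b]
def pvPairLoop (cnt : PySem.Dict String Int) (jp : PySem.Dict (String × String) Int) :
    List String → PySem.Dict (String × String) Int
  | [] => jp
  | a :: queue =>
    let ca := cnt.getD a 0
    let jp' := queue.foldl (fun jp b =>
      let p := if a < b then (a, b) else (b, a)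
      jp.insert p (jp.getD p 0 + 2 * ca * cnt.getD b 0)) jp
    pvPairLoop cnt jp' queue

def workload_join_pattern_tables_alt (workload : List (List String × Int)) : List (String × String × Int) :=
  let jp : PySem.Dict (String × String) Int :=
    workload.foldl (fun jp entry =>
      let cnt := entry.1.foldl (fun c t => c.insert t (c.getD t 0 + 1)) PySem.Dict.empty
      pvPairLoop cnt jp cnt.keys) PySem.Dict.empty
  jp.items.map (fun p => (p.1.1, p.1.2, p.2))

-- ===== PRECONDITION & SPEC =====
def Spec_workload_join_pattern_tables (workload : List (List String × Int)) (out : List (String × String × Int)) : Prop := out = workload_join_pattern_tables_alt workload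
instance (workload : List (List String × Int)) (out : List (String × String × Int)) : Decidable (Spec_workload_join_pattern_tables workload out) := by unfold Spec_workload_join_pattern_tables; infer_instance

-- ===== CLAIM (what is proved, stated in full; the proofs are below) =====
def Claim_equal_workload_join_pattern_tables : Prop := ∀ (workload : List (List String × Int)), Dom_workload_join_pattern_tables workload → Spec_workload_join_pattern_tables workload (workload_join_pattern_tables workload)

-- ===== LEMMAS AND PROOFS =====

def pvKey (j k : String) : String × String := (min j k, max j k)

theorem pvKey_cases (a b c d : String) (hab : a ≠ b) (hcd : c ≠ d)
    (h : pvKey a b = pvKey c d) : (a = c ∧ b = d) ∨ (a = d ∧ b = c) := by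
  rcases le_total a b with h1 | h1 <;> rcases le_total c d with h2 | h2 <;>
    simp [pvKey, min_eq_left, min_eq_right, max_eq_left, max_eq_right, h1, h2, Prod.ext_iff] at h <;>
    tauto

theorem pvKey_inj_right (a b b' : String) (hb : a ≠ b) (hb' : a ≠ b')
    (h : pvKey a b = pvKey a b') : b = b' := by
  rcases pvKey_cases a b a b' hb hb' h with ⟨_, h2⟩ | ⟨h1, h2⟩
  · exact h2
  · exact absurd h1 hb'

def pvBump (d : PySem.Dict (String × String) Int) (k : String × String) (n : Int) :
    PySem.Dict (String × String) Int := d.insert k (d.getD k 0 + n)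

def pvFB (d : PySem.Dict (String × String) Int) (L : List ((String × String) × Int)) :
    PySem.Dict (String × String) Int := L.foldl (fun d p => pvBump d p.1 p.2) d

def pvTot (L : List ((String × String) × Int)) (x : String × String) : Int :=
  ((L.filter (fun p => p.1 = x)).map Prod.snd).sum

theorem pvFB_nodup_keys (L : List ((String × String) × Int))
    (d : PySem.Dict (String × String) Int) (h : d.keys.Nodup) : (pvFB d L).keys.Nodup := by
  induction L generalizing d with
  | nil => exact h
  | cons p L ih => exact ih _ (PySem.Dict.nodup_keys_insert _ _ _ h)

theorem pvTot_cons (k : String × String) (n : Int) (L : List ((String × String) × Int))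
    (x : String × String) : pvTot ((k, n) :: L) x = (if k = x then n else 0) + pvTot L x := by
  by_cases h : k = x <;> simp [pvTot, h]

theorem pvFB_items (L : List ((String × String) × Int))
    (d : PySem.Dict (String × String) Int) (hnd : d.keys.Nodup) :
    (pvFB d L).items =
      d.items.map (fun p => (p.1, p.2 + pvTot L p.1)) ++
        ((PySem.Set.ofList (L.map Prod.fst)).filter (fun k => !(d.contains k))).map
          (fun k => (k, pvTot L k)) := by
  induction L generalizing d with
  | nil => simp [pvFB, pvTot, PySem.Set.ofList]
  | cons p L ih =>
    obtain ⟨k, n⟩ := p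
    have hstep : pvFB d ((k, n) :: L) = pvFB (pvBump d k n) L := rfl
    rw [hstep, ih (pvBump d k n) (by simpa [pvBump] using PySem.Dict.nodup_keys_insert d k (d.getD k 0 + n) hnd)]
    have hco : ∀ x, (pvBump d k n).contains x = (x == k || d.contains x) := by
      intro x; simp [pvBump, PySem.Dict.contains_insert]
    by_cases hc : d.contains k = true
    · rw [show (pvBump d k n).items
          = d.items.map (fun p => if (p.1 == k) = true then (k, d.getD k 0 + n) else p) from
          by simp [pvBump, PySem.Dict.items_insert, hc]]
      rw [List.map_map]
      have hmap : d.items.map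
            ((fun p => (p.1, p.2 + pvTot L p.1)) ∘
              (fun p => if (p.1 == k) = true then (k, d.getD k 0 + n) else p))
          = d.items.map (fun p => (p.1, p.2 + pvTot ((k, n) :: L) p.1)) := by
        apply List.map_congr_left
        intro q hq
        by_cases hqk : q.1 = k
        · have hv : d.getD k 0 = q.2 := by
            rw [← hqk]
            exact PySem.Dict.getD_of_mem_items d (by rwa [← Prod.mk.eta (p := q)] at hq) hnd 0
          simp [Function.comp, hqk, hv, pvTot_cons, Prod.ext_iff]
          ring
        · simp [Function.comp, hqk, Ne.symm hqk, pvTot_cons]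
      rw [hmap]
      congr 1
      rw [List.map_cons, PySem.Set.ofList_cons]
      have hfil : (k :: PySem.Set.discard (PySem.Set.ofList (L.map Prod.fst)) k).filter
            (fun x => !(d.contains x))
          = (PySem.Set.ofList (L.map Prod.fst)).filter (fun x => !((pvBump d k n).contains x)) := by
        rw [List.filter_cons]
        simp only [hc, PySem.Set.discard, List.filter_filter]
        simp only [hco]
        apply List.filter_congr
        intro x _
        by_cases hxk : x = k <;> simp [hxk, hc, Bool.and_comm]
      rw [hfil]
      apply List.map_congr_left
      intro x hx
      have hxk : x ≠ k := by
        rcases List.mem_filter.mp hx with ⟨_, hx2⟩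
        simp [hco] at hx2
        intro h; exact absurd h hx2.1
      simp [pvTot_cons, Ne.symm hxk]
    · have hc' : d.contains k = false := by simpa using hc
      rw [show (pvBump d k n).items = d.items ++ [(k, d.getD k 0 + n)] from
          by simp [pvBump, PySem.Dict.items_insert, hc']]
      rw [PySem.Dict.getD_of_not_contains d 0 hc', List.map_append]
      have hmap : d.items.map (fun p => (p.1, p.2 + pvTot L p.1))
          = d.items.map (fun p => (p.1, p.2 + pvTot ((k, n) :: L) p.1)) := by
        apply List.map_congr_left
        intro q hq
        have hqk : q.1 ≠ k := by
          intro h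
          have hmem : d.contains q.1 = true := by
            rw [PySem.Dict.contains_iff_mem_keys]
            exact List.mem_map_of_mem hq
          rw [h] at hmem; rw [hmem] at hc'; exact absurd hc' (by simp)
        simp [pvTot_cons, Ne.symm hqk]
      rw [hmap]
      simp only [List.map_cons, List.map_nil]
      rw [PySem.Set.ofList_cons, List.filter_cons]
      have hkeep : (!(d.contains k)) = true := by simp [hc']
      rw [if_pos hkeep, List.map_cons]
      have hfil : (PySem.Set.discard (PySem.Set.ofList (L.map Prod.fst)) k).filter
            (fun x => !(d.contains x))
          = (PySem.Set.ofList (L.map Prod.fst)).filter (fun x => !((pvBump d k n).contains x)) := by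
        simp only [PySem.Set.discard, List.filter_filter, hco]
        apply List.filter_congr
        intro x _
        by_cases hxk : x = k <;> simp [hxk, hc', Bool.and_comm]
      rw [← hfil]
      simp only [List.append_assoc, List.singleton_append]
      congr 1
      congr 1
      · simp [pvTot_cons, Prod.ext_iff]
      · apply List.map_congr_left
        intro x hx
        have hxk : x ≠ k := by
          rcases List.mem_filter.mp hx with ⟨hx1, _⟩
          simp [PySem.Set.discard] at hx1
          exact hx1.2
        simp [pvTot_cons, Ne.symm hxk]

theorem pvUpdate_of_mem (s : PySem.Set (String × String)) (t : List (String × String))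
    (h : ∀ y ∈ t, y ∈ s) : PySem.Set.update s t = s := by
  rw [PySem.Set.update_eq_append_filter]
  have : (PySem.Set.ofList t).filter (fun y => !(PySem.Set.contains s y)) = [] := by
    rw [List.filter_eq_nil_iff]
    intro y hy
    have hys : y ∈ s := h y (by rwa [PySem.Set.mem_ofList] at hy)
    simp [PySem.Set.contains_iff, hys]
  rw [this, List.append_nil]

theorem pvMem_update (s : PySem.Set (String × String)) (t : List (String × String))
    (y : String × String) (h : y ∈ s) : y ∈ PySem.Set.update s t := by
  rw [PySem.Set.mem_update]; exact Or.inl h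

theorem pvUpdate_filter_flatMap (g : String → List (String × String)) (x : String)
    (l : List String) (s : PySem.Set (String × String)) (h : ∀ y ∈ g x, y ∈ s) :
    PySem.Set.update s ((l.filter (fun y => !(y == x))).flatMap g) =
      PySem.Set.update s (l.flatMap g) := by
  induction l generalizing s with
  | nil => rfl
  | cons a l ih =>
    by_cases hax : a = x
    · subst hax
      rw [List.filter_cons_of_neg (by simp), List.flatMap_cons, PySem.Set.update_append,
        pvUpdate_of_mem s (g a) h]
      exact ih s h
    · rw [List.filter_cons_of_pos (by simp [hax]), List.flatMap_cons, List.flatMap_cons,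
        PySem.Set.update_append, PySem.Set.update_append]
      exact ih (PySem.Set.update s (g a)) (fun y hy => pvMem_update _ _ _ (h y hy))

theorem pvUpdate_flatMap_ofList (g : String → List (String × String)) (l : List String)
    (s : PySem.Set (String × String)) :
    PySem.Set.update s (l.flatMap g) = PySem.Set.update s ((PySem.Set.ofList l).flatMap g) := by
  induction l generalizing s with
  | nil => rfl
  | cons a l ih =>
    rw [PySem.Set.ofList_cons, List.flatMap_cons, List.flatMap_cons,
      PySem.Set.update_append, PySem.Set.update_append]
    rw [ih (PySem.Set.update s (g a))]
    exact (pvUpdate_filter_flatMap g a (PySem.Set.ofList l) (PySem.Set.update s (g a))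
      (fun y hy => by rw [PySem.Set.mem_update]; exact Or.inr hy)).symm

theorem pvUpdate_map_ofList (f : String → String × String) (l : List String)
    (s : PySem.Set (String × String)) :
    PySem.Set.update s (l.map f) = PySem.Set.update s ((PySem.Set.ofList l).map f) := by
  have hfm : ∀ m : List String, m.flatMap (fun y => [f y]) = m.map f := by
    intro m; induction m with
    | nil => rfl
    | cons a m ih => rw [List.flatMap_cons, List.map_cons, ih]; rfl
  have h1 : l.map f = l.flatMap (fun y => [f y]) := (hfm l).symm
  have h2 : (PySem.Set.ofList l).map f = (PySem.Set.ofList l).flatMap (fun y => [f y]) := (hfm _).symm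
  rw [h1, h2, pvUpdate_flatMap_ofList]

theorem pvUpdate_flatMap_congr (g g' : String → List (String × String)) (l : List String)
    (h : ∀ j ∈ l, ∀ s : PySem.Set (String × String), PySem.Set.update s (g j) = PySem.Set.update s (g' j))
    (s : PySem.Set (String × String)) :
    PySem.Set.update s (l.flatMap g) = PySem.Set.update s (l.flatMap g') := by
  induction l generalizing s with
  | nil => rfl
  | cons a l ih =>
    rw [List.flatMap_cons, List.flatMap_cons, PySem.Set.update_append, PySem.Set.update_append,
      h a (by simp)]
    exact ih (fun j hj s => h j (by simp [hj]) s) _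

theorem pvUpdate_strip_heads (hd : String → String × String)
    (blk : String → List (String × String)) (l : List String)
    (s : PySem.Set (String × String)) (h : ∀ j ∈ l, hd j ∈ s) :
    PySem.Set.update s (l.flatMap (fun j => hd j :: blk j)) =
      PySem.Set.update s (l.flatMap blk) := by
  induction l generalizing s with
  | nil => rfl
  | cons a l ih =>
    rw [List.flatMap_cons, List.flatMap_cons, PySem.Set.update_append, PySem.Set.update_append]
    have hadd : PySem.Set.update s (hd a :: blk a) = PySem.Set.update s (blk a) := by
      show PySem.Set.update (PySem.Set.add s (hd a)) (blk a) = _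
      rw [PySem.Set.add_of_mem (h a (by simp))]
    rw [hadd]
    exact ih (PySem.Set.update s (blk a)) (fun j hj => pvMem_update _ _ _ (h j (by simp [hj])))

theorem pvOfList_filter (p : String → Bool) (l : List String) :
    PySem.Set.ofList (l.filter p) = (PySem.Set.ofList l).filter p := by
  induction l with
  | nil => rfl
  | cons a l ih =>
    by_cases ha : p a = true
    · rw [List.filter_cons_of_pos ha, PySem.Set.ofList_cons, PySem.Set.ofList_cons,
        List.filter_cons_of_pos ha, ih]
      simp [PySem.Set.discard, List.filter_filter, Bool.and_comm]
    · rw [List.filter_cons_of_neg (by simpa using ha), PySem.Set.ofList_cons,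
        List.filter_cons_of_neg (by simpa using ha), ih]
      simp [PySem.Set.discard, List.filter_filter]
      apply List.filter_congr
      intro x _
      by_cases hxa : x = a <;> simp [hxa, ha]

def pvLA (xs : List String) : List ((String × String) × Int) :=
  xs.flatMap (fun j => (xs.filter (fun k => j ≠ k)).map (fun k => (pvKey j k, (1 : Int))))

def pvLB (xs : List String) : List String → List ((String × String) × Int)
  | [] => []
  | a :: rest =>
    rest.map (fun b => (pvKey a b, 2 * (xs.count a : Int) * (xs.count b : Int))) ++ pvLB xs rest

def pvUpper : List String → List (String × String)
  | [] => []
  | a :: rest => rest.map (pvKey a) ++ pvUpper rest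

theorem pvKey_comm (j k : String) : pvKey j k = pvKey k j := by
  simp [pvKey, min_comm, max_comm]

theorem pvFlatMap_congr {α β : Type} (l : List α) (f g : α → List β)
    (h : ∀ j ∈ l, f j = g j) : l.flatMap f = l.flatMap g := by
  induction l with
  | nil => rfl
  | cons a l ih =>
    rw [List.flatMap_cons, List.flatMap_cons, h a (by simp), ih (fun j hj => h j (by simp [hj]))]

theorem pvUpper_mem (vals : List String) (hnd : vals.Nodup) (x : String × String)
    (h : x ∈ pvUpper vals) : ∃ a ∈ vals, ∃ b ∈ vals, a ≠ b ∧ x = pvKey a b := by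
  induction vals with
  | nil => simp [pvUpper] at h
  | cons a rest ih =>
    rcases List.nodup_cons.mp hnd with ⟨ha, hrest⟩
    rw [pvUpper, List.mem_append] at h
    rcases h with h | h
    · rcases List.mem_map.mp h with ⟨b, hb, hx⟩
      exact ⟨a, by simp, b, by simp [hb], fun e => ha (e ▸ hb), hx.symm⟩
    · rcases ih hrest h with ⟨c, hc, d, hd, hcd, hx⟩
      exact ⟨c, by simp [hc], d, by simp [hd], hcd, hx⟩

theorem pvUpper_nodup (vals : List String) (h : vals.Nodup) : (pvUpper vals).Nodup := by
  induction vals with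
  | nil => exact List.nodup_nil
  | cons a rest ih =>
    rw [pvUpper]
    rcases List.nodup_cons.mp h with ⟨ha, hrest⟩
    apply List.Nodup.append
    · exact List.Nodup.map_on (fun b hb c hc he =>
        pvKey_inj_right a b c (fun e => ha (e ▸ hb)) (fun e => ha (e ▸ hc)) he) hrest
    · exact ih hrest
    · intro x hx1 hx2
      rcases List.mem_map.mp hx1 with ⟨b, hb, hxb⟩
      rcases pvUpper_mem rest hrest x hx2 with ⟨c, hc, d, hd, hcd, hxcd⟩
      have hab : a ≠ b := fun e => ha (e ▸ hb)
      rcases pvKey_cases a b c d hab hcd (by rw [hxb, hxcd]) with ⟨h1, _⟩ | ⟨h1, _⟩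
      · exact ha (h1 ▸ hc)
      · exact ha (h1 ▸ hd)

theorem pvUpdate_triangle (vals : List String) (hnd : vals.Nodup)
    (s : PySem.Set (String × String))
    (hdisj : ∀ a ∈ vals, ∀ b ∈ vals, a ≠ b → pvKey a b ∉ s) :
    PySem.Set.update s (vals.flatMap (fun j => (vals.filter (fun k => j ≠ k)).map (pvKey j))) =
      s ++ pvUpper vals := by
  induction vals generalizing s with
  | nil => simp [pvUpper]
  | cons a rest ih =>
    rcases List.nodup_cons.mp hnd with ⟨ha, hrest⟩
    rw [List.flatMap_cons, PySem.Set.update_append]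
    have hhead : (a :: rest).filter (fun k => a ≠ k) = rest := by
      rw [List.filter_cons_of_neg (by simp)]
      exact List.filter_eq_self.mpr (fun b hb => by simp; exact fun e => ha (e ▸ hb))
    rw [hhead]
    have hmapnd : (rest.map (pvKey a)).Nodup :=
      List.Nodup.map_on (fun b hb c hc he =>
        pvKey_inj_right a b c (fun e => ha (e ▸ hb)) (fun e => ha (e ▸ hc)) he) hrest
    have hs1 : PySem.Set.update s (rest.map (pvKey a)) = s ++ rest.map (pvKey a) := by
      apply PySem.Set.update_eq_append_of_disjoint _ _ hmapnd
      intro x hx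
      rcases List.mem_map.mp hx with ⟨b, hb, hxb⟩
      exact hxb ▸ hdisj a (by simp) b (by simp [hb]) (fun e => ha (e ▸ hb))
    rw [hs1]
    have hfl : rest.flatMap (fun j => ((a :: rest).filter (fun k => j ≠ k)).map (pvKey j))
        = rest.flatMap (fun j => pvKey j a :: ((rest.filter (fun k => j ≠ k)).map (pvKey j))) := by
      apply pvFlatMap_congr
      intro j hj
      rw [List.filter_cons_of_pos (by simp; exact fun e => ha (e ▸ hj)), List.map_cons]
    rw [hfl]
    rw [pvUpdate_strip_heads (fun j => pvKey j a) _ rest _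
      (fun j hj => by
        apply List.mem_append_right
        show pvKey j a ∈ _
        rw [pvKey_comm]
        exact List.mem_map_of_mem hj)]
    rw [ih hrest (s ++ rest.map (pvKey a)) ?_]
    · rw [pvUpper, List.append_assoc]
    · intro b hb c hc hbc
      rw [List.mem_append]
      rintro (hin | hin)
      · exact hdisj b (by simp [hb]) c (by simp [hc]) hbc hin
      · rcases List.mem_map.mp hin with ⟨e, he, hke⟩
        have hae : a ≠ e := fun q => ha (q ▸ he)
        rcases pvKey_cases a e b c hae hbc hke with ⟨h1, _⟩ | ⟨h1, _⟩
        · exact ha (h1 ▸ hb)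
        · exact ha (h1 ▸ hc)

theorem pvLB_keys (xs : List String) (vals : List String) :
    (pvLB xs vals).map Prod.fst = pvUpper vals := by
  induction vals with
  | nil => rfl
  | cons a rest ih => rw [pvLB, pvUpper, List.map_append, List.map_map, ih]; rfl

theorem pvKeys_eq (xs : List String) :
    PySem.Set.ofList ((pvLA xs).map Prod.fst) =
      PySem.Set.ofList ((pvLB xs (PySem.Set.ofList xs)).map Prod.fst) := by
  have h1 : (pvLA xs).map Prod.fst
      = xs.flatMap (fun j => (xs.filter (fun k => j ≠ k)).map (pvKey j)) := by
    simp only [pvLA, List.map_flatMap, List.map_map]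
    rfl
  rw [h1, pvLB_keys]
  have h2 : PySem.Set.ofList (pvUpper (PySem.Set.ofList xs)) = pvUpper (PySem.Set.ofList xs) :=
    PySem.Set.ofList_eq_self_of_nodup _ (pvUpper_nodup _ (PySem.Set.nodup_ofList xs))
  rw [h2]
  have h3 : PySem.Set.ofList (xs.flatMap (fun j => (xs.filter (fun k => j ≠ k)).map (pvKey j)))
      = PySem.Set.update [] (xs.flatMap (fun j => (xs.filter (fun k => j ≠ k)).map (pvKey j))) := rfl
  rw [h3, pvUpdate_flatMap_ofList]
  rw [pvUpdate_flatMap_congr _ (fun j => ((PySem.Set.ofList xs).filter (fun k => j ≠ k)).map (pvKey j)) _ ?_]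
  · rw [pvUpdate_triangle (PySem.Set.ofList xs) (PySem.Set.nodup_ofList xs) []
      (by intro a _ b _ _ h; simp at h)]
    rfl
  · intro j _ s
    rw [pvUpdate_map_ofList, pvOfList_filter]

def pvSB (c : String → Int) (x : String × String) : List String → Int
  | [] => 0
  | a :: rest => (rest.map (fun b => if pvKey a b = x then 2 * c a * c b else 0)).sum + pvSB c x rest

theorem pvTot_append (l1 l2 : List ((String × String) × Int)) (x : String × String) :
    pvTot (l1 ++ l2) x = pvTot l1 x + pvTot l2 x := by
  simp [pvTot, List.filter_append]

theorem pvSum_mul_right (l : List String) (f : String → Int) (r : Int) :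
    (l.map (fun j => f j * r)).sum = (l.map f).sum * r := by
  induction l with
  | nil => simp
  | cons a l ih => simp [ih]; ring

theorem pvTot_map (l : List String) (f : String → String × String) (c : String → Int)
    (x : String × String) :
    pvTot (l.map (fun k => (f k, c k))) x = (l.map (fun k => if f k = x then c k else 0)).sum := by
  induction l with
  | nil => simp [pvTot]
  | cons a l ih =>
    rw [List.map_cons, List.map_cons, pvTot_cons, List.sum_cons, ih]

theorem pvSum_filter_ite (l : List String) (p : String → Prop) [DecidablePred p] (f : String → Int) :
    ((l.filter (fun k => decide (p k))).map f).sum = (l.map (fun k => if p k then f k else 0)).sum := by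
  induction l with
  | nil => rfl
  | cons a l ih =>
    by_cases ha : p a
    · rw [List.filter_cons_of_pos (by simpa using ha), List.map_cons, List.map_cons,
        List.sum_cons, List.sum_cons, ih, if_pos ha]
    · rw [List.filter_cons_of_neg (by simpa using ha), List.map_cons, List.sum_cons, ih,
        if_neg ha, zero_add]

theorem pvTot_flatMap (l : List String) (g : String → List ((String × String) × Int))
    (x : String × String) :
    pvTot (l.flatMap g) x = (l.map (fun j => pvTot (g j) x)).sum := by
  induction l with
  | nil => simp [pvTot]
  | cons a l ih => rw [List.flatMap_cons, pvTot_append, List.map_cons, List.sum_cons, ih]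

theorem pvSum_single (l : List String) (hl : l.Nodup) (x : String) (hx : x ∈ l)
    (w : String → Int) : (l.map (fun j => if j = x then w j else 0)).sum = w x := by
  induction l with
  | nil => simp at hx
  | cons a l ih =>
    rcases List.nodup_cons.mp hl with ⟨ha, hl'⟩
    rw [List.map_cons, List.sum_cons]
    by_cases hax : a = x
    · subst hax
      rw [if_pos rfl]
      have : (l.map (fun j => if j = a then w j else 0)).sum = 0 := by
        apply List.sum_eq_zero
        intro y hy
        rcases List.mem_map.mp hy with ⟨j, hj, hje⟩
        rw [if_neg (fun e => ha (by rw [← e]; exact hj))] at hje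
        exact hje.symm
      rw [this, add_zero]
    · rcases List.mem_cons.mp hx with hx | hx
      · exact absurd hx.symm hax
      · rw [if_neg hax, zero_add, ih hl' hx]

theorem pvSum_dedup (xs : List String) (l : List String) (hl : l.Nodup)
    (hsub : ∀ j ∈ xs, j ∈ l) (h : String → Int) :
    (xs.map h).sum = (l.map (fun j => (xs.count j : Int) * h j)).sum := by
  induction xs with
  | nil =>
    rw [List.map_nil, List.sum_nil]
    symm
    apply List.sum_eq_zero
    intro y hy
    rcases List.mem_map.mp hy with ⟨j, _, hje⟩
    simpa using hje.symm
  | cons a xs ih =>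
    rw [List.map_cons, List.sum_cons, ih (fun j hj => hsub j (by simp [hj]))]
    have hsplit : l.map (fun j => ((a :: xs).count j : Int) * h j)
        = l.map (fun j => (xs.count j : Int) * h j + (if j = a then h j else 0)) := by
      apply List.map_congr_left
      intro j _
      rw [List.count_cons]
      by_cases hja : j = a
      · simp [hja]; push_cast; ring
      · simp [hja]
        exact Or.inl (fun e => hja e.symm)
    rw [hsplit, PySem.List.sum_map_add_int, pvSum_single l hl a (hsub a (by simp)) h]
    ring
theorem pvSA_eq_pvSB (c : String → Int) (x : String × String) (vals : List String)
    (hnd : vals.Nodup) :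
    (vals.map (fun j => c j * (vals.map (fun k => if j ≠ k ∧ pvKey j k = x then c k else 0)).sum)).sum
      = pvSB c x vals := by
  induction vals with
  | nil => rfl
  | cons a rest ih =>
    rcases List.nodup_cons.mp hnd with ⟨ha, hrest⟩
    rw [List.map_cons, List.sum_cons, pvSB]
    have hinner_a : ((a :: rest).map (fun k => if a ≠ k ∧ pvKey a k = x then c k else 0)).sum
        = (rest.map (fun k => if pvKey a k = x then c k else 0)).sum := by
      rw [List.map_cons, List.sum_cons, if_neg (by simp), zero_add]
      congr 1
      apply List.map_congr_left
      intro k hk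
      have : a ≠ k := fun e => ha (e ▸ hk)
      simp [this]
    have hinner_j : rest.map (fun j => c j * ((a :: rest).map
          (fun k => if j ≠ k ∧ pvKey j k = x then c k else 0)).sum)
        = rest.map (fun j => (if pvKey a j = x then c j * c a else 0)
            + c j * (rest.map (fun k => if j ≠ k ∧ pvKey j k = x then c k else 0)).sum) := by
      apply List.map_congr_left
      intro j hj
      rw [List.map_cons, List.sum_cons]
      have hja : j ≠ a := fun e => ha (e ▸ hj)
      rw [pvKey_comm]
      by_cases hkey : pvKey a j = x
      · simp [hja, hkey]; ring
      · simp [hja, hkey]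
    rw [hinner_a, hinner_j, PySem.List.sum_map_add_int, ih hrest]
    have e1 : rest.map (fun j => if pvKey a j = x then c j * c a else 0)
        = rest.map (fun j => (if pvKey a j = x then c j else 0) * c a) :=
      List.map_congr_left (fun j _ => by by_cases h : pvKey a j = x <;> simp [h])
    have e2 : rest.map (fun b => if pvKey a b = x then 2 * c a * c b else 0)
        = rest.map (fun b => (if pvKey a b = x then c b else 0) * (2 * c a)) :=
      List.map_congr_left (fun b _ => by by_cases h : pvKey a b = x <;> simp [h] <;> ring)
    rw [e1, e2, pvSum_mul_right, pvSum_mul_right]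
    ring

theorem pvFB_append (d : PySem.Dict (String × String) Int)
    (l1 l2 : List ((String × String) × Int)) : pvFB d (l1 ++ l2) = pvFB (pvFB d l1) l2 := by
  simp [pvFB, List.foldl_append]

theorem pvLB_tot (xs : List String) (x : String × String) (vals : List String) :
    pvTot (pvLB xs vals) x = pvSB (fun t => (xs.count t : Int)) x vals := by
  induction vals with
  | nil => simp [pvLB, pvTot, pvSB]
  | cons a rest ih => rw [pvLB, pvTot_append, pvSB, ih, pvTot_map]

theorem pvTot_eq (xs : List String) (x : String × String) :
    pvTot (pvLA xs) x = pvTot (pvLB xs (PySem.Set.ofList xs)) x := by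
  have hsub : ∀ j ∈ xs, j ∈ PySem.Set.ofList xs := fun j hj => (PySem.Set.mem_ofList _ _).mpr hj
  have hnd := PySem.Set.nodup_ofList xs
  rw [pvLA, pvTot_flatMap, pvLB_tot]
  have hblock : xs.map (fun j =>
        pvTot ((xs.filter (fun k => j ≠ k)).map (fun k => (pvKey j k, (1 : Int)))) x)
      = xs.map (fun j =>
          ((PySem.Set.ofList xs).map (fun k =>
            if j ≠ k ∧ pvKey j k = x then (xs.count k : Int) else 0)).sum) := by
    apply List.map_congr_left
    intro j _
    rw [pvTot_map, pvSum_filter_ite, pvSum_dedup xs (PySem.Set.ofList xs) hnd hsub]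
    apply congrArg List.sum
    apply List.map_congr_left
    intro k _
    by_cases h1 : j ≠ k
    · by_cases h2 : pvKey j k = x <;> simp [h1, h2]
    · simp [h1]
  rw [hblock, pvSum_dedup xs (PySem.Set.ofList xs) hnd hsub]
  exact pvSA_eq_pvSB (fun t => (xs.count t : Int)) x (PySem.Set.ofList xs) hnd

theorem pvFB_flatMap (l : List String) (g : String → List ((String × String) × Int))
    (jp : PySem.Dict (String × String) Int) :
    l.foldl (fun d j => pvFB d (g j)) jp = pvFB jp (l.flatMap g) := by
  induction l generalizing jp with
  | nil => rfl
  | cons a l ih => rw [List.foldl_cons, List.flatMap_cons, pvFB_append, ih]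

theorem pvStepA (xs : List String) (jp : PySem.Dict (String × String) Int) :
    xs.foldl (fun jp j =>
      xs.foldl (fun jp k =>
        if j ≠ k then
          let lt := min j k
          let rt := max j k
          if jp.contains (lt, rt) = false then jp.insert (lt, rt) 1
          else jp.insert (lt, rt) (jp.getD (lt, rt) 0 + 1)
        else jp) jp) jp = pvFB jp (pvLA xs) := by
  have hbody : ∀ (jp : PySem.Dict (String × String) Int) (j k : String),
      (if j ≠ k then
        let lt := min j k
        let rt := max j k
        if jp.contains (lt, rt) = false then jp.insert (lt, rt) 1
        else jp.insert (lt, rt) (jp.getD (lt, rt) 0 + 1)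
      else jp) = if j ≠ k then pvBump jp (pvKey j k) 1 else jp := by
    intro jp j k
    by_cases hjk : j ≠ k
    · rw [if_pos hjk, if_pos hjk]
      show (if jp.contains (min j k, max j k) = false then _ else _) = _
      by_cases hc : jp.contains (min j k, max j k) = false
      · rw [if_pos hc, pvBump, pvKey, PySem.Dict.getD_of_not_contains jp 0 hc, zero_add]
      · rw [if_neg hc]; rfl
    · rw [if_neg hjk, if_neg hjk]
  have hinner : ∀ (jp : PySem.Dict (String × String) Int) (j : String),
      xs.foldl (fun jp k =>
        if j ≠ k then
          let lt := min j k
          let rt := max j k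
          if jp.contains (lt, rt) = false then jp.insert (lt, rt) 1
          else jp.insert (lt, rt) (jp.getD (lt, rt) 0 + 1)
        else jp) jp
      = pvFB jp ((xs.filter (fun k => j ≠ k)).map (fun k => (pvKey j k, (1 : Int)))) := by
    intro jp j
    rw [show (fun (jp : PySem.Dict (String × String) Int) k =>
        if j ≠ k then
          let lt := min j k
          let rt := max j k
          if jp.contains (lt, rt) = false then jp.insert (lt, rt) 1
          else jp.insert (lt, rt) (jp.getD (lt, rt) 0 + 1)
        else jp) = fun jp k => if j ≠ k then pvBump jp (pvKey j k) 1 else jp from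
      funext fun jp => funext fun k => hbody jp j k]
    rw [PySem.List.foldl_ite_eq_foldl_filter]
    rw [pvFB, List.foldl_map]
  rw [show (fun (jp : PySem.Dict (String × String) Int) j =>
      xs.foldl (fun jp k =>
        if j ≠ k then
          let lt := min j k
          let rt := max j k
          if jp.contains (lt, rt) = false then jp.insert (lt, rt) 1
          else jp.insert (lt, rt) (jp.getD (lt, rt) 0 + 1)
        else jp) jp)
    = fun jp j => pvFB jp ((xs.filter (fun k => j ≠ k)).map (fun k => (pvKey j k, (1 : Int)))) from
    funext fun jp => funext fun j => hinner jp j]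
  rw [pvFB_flatMap]
  rfl

theorem pvStepB (xs : List String) (jp : PySem.Dict (String × String) Int)
    (queue : List String) (hnd : queue.Nodup) :
    pvPairLoop (PySem.Dict.counter xs) jp queue = pvFB jp (pvLB xs queue) := by
  induction queue generalizing jp with
  | nil => rfl
  | cons a rest ih =>
    rcases List.nodup_cons.mp hnd with ⟨ha, hrest⟩
    rw [pvPairLoop, pvLB, pvFB_append]
    have hfold : rest.foldl (fun jp b =>
        let p := if a < b then (a, b) else (b, a)
        jp.insert p (jp.getD p 0 + 2 * ((PySem.Dict.counter xs).getD a 0) * ((PySem.Dict.counter xs).getD b 0))) jp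
      = pvFB jp (rest.map (fun b => (pvKey a b, 2 * (xs.count a : Int) * (xs.count b : Int)))) := by
      rw [pvFB, List.foldl_map]
      apply PySem.List.foldl_congr_mem
      intro d b hb
      have hab : a ≠ b := fun e => ha (e ▸ hb)
      have hkey : (if a < b then (a, b) else (b, a)) = pvKey a b := by
        rcases lt_or_gt_of_ne hab with h | h
        · rw [if_pos h, pvKey, min_eq_left h.le, max_eq_right h.le]
        · rw [if_neg (not_lt_of_gt h), pvKey, min_eq_right h.le, max_eq_left h.le]
      show (let p := if a < b then (a, b) else (b, a); _) = _
      rw [show (2 * ((PySem.Dict.counter xs).getD a 0) * ((PySem.Dict.counter xs).getD b 0))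
          = 2 * (xs.count a : Int) * (xs.count b : Int) from by
        rw [PySem.Dict.getD_counter, PySem.Dict.getD_counter]]
      simp only [hkey]
      rfl
    rw [hfold, ih _ hrest]

theorem pvStep_eq (xs : List String) (d : PySem.Dict (String × String) Int)
    (hnd : d.keys.Nodup) : pvFB d (pvLA xs) = pvFB d (pvLB xs (PySem.Set.ofList xs)) := by
  apply PySem.Dict.ext
  rw [pvFB_items _ _ hnd, pvFB_items _ _ hnd, pvKeys_eq xs]
  congr 1
  · apply List.map_congr_left
    intro p _
    rw [pvTot_eq]
  · apply List.map_congr_left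
    intro k _
    rw [pvTot_eq]

theorem pvMain_fold (wl : List (List String × Int)) :
    ∀ jp : PySem.Dict (String × String) Int, jp.keys.Nodup →
      wl.foldl (fun jp i =>
        i.1.foldl (fun jp j =>
          i.1.foldl (fun jp k =>
            if j ≠ k then
              let lt := min j k
              let rt := max j k
              if jp.contains (lt, rt) = false then jp.insert (lt, rt) 1
              else jp.insert (lt, rt) (jp.getD (lt, rt) 0 + 1)
            else jp) jp) jp) jp
      = wl.foldl (fun jp entry =>
          let cnt := entry.1.foldl (fun c t => c.insert t (c.getD t 0 + 1)) PySem.Dict.empty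
          pvPairLoop cnt jp cnt.keys) jp := by
  induction wl with
  | nil => intro jp _; rfl
  | cons i rest ih =>
    intro jp hnd
    rw [List.foldl_cons, List.foldl_cons]
    have hA : i.1.foldl (fun jp j =>
        i.1.foldl (fun jp k =>
          if j ≠ k then
            let lt := min j k
            let rt := max j k
            if jp.contains (lt, rt) = false then jp.insert (lt, rt) 1
            else jp.insert (lt, rt) (jp.getD (lt, rt) 0 + 1)
          else jp) jp) jp = pvFB jp (pvLA i.1) := pvStepA i.1 jp
    have hcnt : i.1.foldl (fun c t => c.insert t (c.getD t 0 + 1)) PySem.Dict.empty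
        = PySem.Dict.counter i.1 := PySem.Dict.foldl_insert_getD_add_one_eq_counter i.1
    have hB : (let cnt := i.1.foldl (fun c t => c.insert t (c.getD t 0 + 1)) PySem.Dict.empty
        pvPairLoop cnt jp cnt.keys) = pvFB jp (pvLB i.1 (PySem.Set.ofList i.1)) := by
      show pvPairLoop _ jp _ = _
      rw [hcnt, PySem.Dict.keys_counter]
      exact pvStepB i.1 jp _ (PySem.Set.nodup_ofList i.1)
    rw [hA, hB, pvStep_eq i.1 jp hnd]
    exact ih _ (pvFB_nodup_keys _ _ hnd)


-- ===== VERDICT (by name: the statement is the Claim_ definition above) =====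
theorem workload_join_pattern_tables_spec : Claim_equal_workload_join_pattern_tables := by
  intro workload _
  unfold Spec_workload_join_pattern_tables
  unfold workload_join_pattern_tables workload_join_pattern_tables_alt
  apply congrArg (fun d : PySem.Dict (String × String) Int => d.items.map (fun p => (p.1.1, p.1.2, p.2)))
  exact pvMain_fold workload PySem.Dict.empty
    (by simpa using PySem.Dict.nodup_keys_empty (κ := String × String) (ν := Int))
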